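-- pv_equiv track=rewrite | github.com/KNU-HAEDAL/2024-SS-small-group-ALSol | JYPARK/21to30/26.py | solution
-- ===== SOURCE A (Python) =====
-- def inorder_traversal(tree, node, result):
--     if node != None:
--         left_child, right_child = tree[node]
--         inorder_traversal(tree, left_child, result)
--         result.append(node)
--         inorder_traversal(tree, right_child, result)
--     return result
--
-- def preorder_traversal(tree, node, result):
--     if node != None:
--         left_child, right_child = tree[node]
--         result.append(node)
--         preorder_traversal(tree, left_child, result)
--         preorder_traversal(tree, right_child, result)
--     return result
--
-- def postorder_traversal(tree, node, result):
--     if node != None: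
--         left_child, right_chile = tree[node]
--         postorder_traversal(tree, left_child, result)
--         postorder_traversal(tree, right_chile, result)
--         result.append(node)
--     return result
--
-- def solution(nodes):
--     answer = []
--     result = []
--     #key는 node, value는 튜플로 왼쪽자식, 오른쪽자식
--     tree = { }
--     for i in range(1, len(nodes)+1):
--         if i*2 > len(nodes):
--             tree[i] = (None, None)
--         else:
--            tree[i] = (i*2, i*2+1)
--
--     answer.append(" ".join(map(str,preorder_traversal(tree, 1, result))))
--     result = []
--     answer.append(" ".join(map(str,inorder_traversal(tree, 1, result))))
--     result = []
--     answer.append(" ".join(map(str,postorder_traversal(tree, 1, result))))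
--     return answer
-- ===== SOURCE B (Python) =====
-- def solution(nodes):
--     n = len(nodes)
--
--     def pre(i):
--         if i > n:
--             return []
--         return [i] + pre(2 * i) + pre(2 * i + 1)
--
--     def ino(i):
--         if i > n:
--             return []
--         return ino(2 * i) + [i] + ino(2 * i + 1)
--
--     def post(i):
--         if i > n:
--             return []
--         return post(2 * i) + post(2 * i + 1) + [i]
--
--     return [" ".join(map(str, pre(1))),
--             " ".join(map(str, ino(1))),
--             " ".join(map(str, post(1)))]
-- ===== Notes on version B (the rewrite author's own statement) =====
-- stated objective: simpler
-- what changed: B drops the explicit child-dictionary and the mutated result list entirely: each traversal is a pure recursion on the node index (children 2i and 2i+1, stop when i exceeds len(nodes)) that returns the list directly.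
-- crash fix: On every even-length nodes (including []) A raises KeyError (the tree maps the last internal node to a right child index that was never inserted); B returns the three traversals of the complete binary tree on indices 1..len(nodes). — e.g. on solution([5, 7]): A raises KeyError, B returns ["1 2", "2 1", "2 1"]
import Mathlib
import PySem

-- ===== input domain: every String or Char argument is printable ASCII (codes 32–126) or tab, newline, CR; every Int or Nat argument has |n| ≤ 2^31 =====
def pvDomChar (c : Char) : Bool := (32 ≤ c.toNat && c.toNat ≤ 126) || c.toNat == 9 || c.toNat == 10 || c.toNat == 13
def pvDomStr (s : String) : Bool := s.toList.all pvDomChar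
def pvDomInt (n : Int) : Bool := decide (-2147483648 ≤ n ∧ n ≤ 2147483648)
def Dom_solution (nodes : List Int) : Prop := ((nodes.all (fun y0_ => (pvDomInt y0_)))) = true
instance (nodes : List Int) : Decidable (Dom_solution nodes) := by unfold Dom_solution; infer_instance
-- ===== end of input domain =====

-- B replaces A's child-dictionary plus a mutated result list by three pure recursions
-- on the node index (simpler, same cost); equivalence is about the return value only.

-- ===== PORT A =====
-- the tree dict: i ↦ (None,None) if 2i > len(nodes), else (2i, 2i+1)
def treeA (n : Int) : PySem.Dict Int (Option Int × Option Int) :=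
  (PySem.List.pyRange 1 (n + 1) 1).foldl
    (fun t i => if i * 2 > n then t.insert i (none, none)
                else t.insert i (some (i * 2), some (i * 2 + 1)))
    PySem.Dict.empty

-- recursive traversals; fuel is only a totality guard (never exhausted inside Pre_);
-- a missing key (Python KeyError) returns the accumulator, which Pre_ excludes.
def preA (tree : PySem.Dict Int (Option Int × Option Int)) : Nat → Option Int → List Int → List Int
  | 0, _, res => res
  | _, none, res => res
  | fuel + 1, some v, res =>
    match tree.get? v with
    | none => res
    | some (l, r) => preA tree fuel r (preA tree fuel l (res ++ [v]))

def inoA (tree : PySem.Dict Int (Option Int × Option Int)) : Nat → Option Int → List Int → List Int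
  | 0, _, res => res
  | _, none, res => res
  | fuel + 1, some v, res =>
    match tree.get? v with
    | none => res
    | some (l, r) => inoA tree fuel r (inoA tree fuel l res ++ [v])

def postA (tree : PySem.Dict Int (Option Int × Option Int)) : Nat → Option Int → List Int → List Int
  | 0, _, res => res
  | _, none, res => res
  | fuel + 1, some v, res =>
    match tree.get? v with
    | none => res
    | some (l, r) => postA tree fuel r (postA tree fuel l res) ++ [v]

def solution (nodes : List Int) : List String :=
  let n : Int := PySem.List.len nodes
  let tree := treeA n
  let fuel := nodes.length + 1
  [PySem.Str.join " " ((preA tree fuel (some 1) []).map PySem.Int.toStr),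
   PySem.Str.join " " ((inoA tree fuel (some 1) []).map PySem.Int.toStr),
   PySem.Str.join " " ((postA tree fuel (some 1) []).map PySem.Int.toStr)]

-- ===== PORT B =====
def preB (n : Int) : Nat → Int → List Int
  | 0, _ => []
  | fuel + 1, i => if i > n then [] else [i] ++ preB n fuel (2 * i) ++ preB n fuel (2 * i + 1)

def inoB (n : Int) : Nat → Int → List Int
  | 0, _ => []
  | fuel + 1, i => if i > n then [] else inoB n fuel (2 * i) ++ [i] ++ inoB n fuel (2 * i + 1)

def postB (n : Int) : Nat → Int → List Int
  | 0, _ => []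
  | fuel + 1, i => if i > n then [] else postB n fuel (2 * i) ++ postB n fuel (2 * i + 1) ++ [i]

def solution_alt (nodes : List Int) : List String :=
  let n : Int := PySem.List.len nodes
  let fuel := nodes.length + 1
  [PySem.Str.join " " ((preB n fuel 1).map PySem.Int.toStr),
   PySem.Str.join " " ((inoB n fuel 1).map PySem.Int.toStr),
   PySem.Str.join " " ((postB n fuel 1).map PySem.Int.toStr)]

-- ===== PRECONDITION & SPEC =====
-- A raises KeyError exactly when len(nodes) is even (including 0): the node n/2 gets
-- right child n+1, which is not a key of the tree dict (and for n = 0, node 1 is missing).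
def Pre_solution (nodes : List Int) : Prop := nodes.length % 2 = 1
instance (nodes : List Int) : Decidable (Pre_solution nodes) := by unfold Pre_solution; infer_instance
def pvWitness_solution : List Int := [0]

-- On every even-length nodes (including []) A raises KeyError; B returns the three
-- traversals of the complete binary tree on indices 1..len(nodes).
def Raises_solution (nodes : List Int) : Prop := nodes.length % 2 = 0
instance (nodes : List Int) : Decidable (Raises_solution nodes) := by unfold Raises_solution; infer_instance
def pvRaiseWitness_solution : List Int := [5, 7]
def pvRaiseWitnessOut_solution : List String := ["1 2", "2 1", "2 1"]

def Spec_solution (nodes : List Int) (out : List String) : Prop := out = solution_alt nodes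
instance (nodes : List Int) (out : List String) : Decidable (Spec_solution nodes out) := by unfold Spec_solution; infer_instance

-- ===== CLAIM (what is proved, stated in full; the proofs are below) =====
def Claim_equal_solution : Prop := ∀ (nodes : List Int), Dom_solution nodes → Pre_solution nodes → Spec_solution nodes (solution nodes)
def Claim_raises_solution : Prop := (∀ (nodes : List Int), Dom_solution nodes → Raises_solution nodes → ¬ Pre_solution nodes) ∧ (Dom_solution (pvRaiseWitness_solution) ∧ Raises_solution (pvRaiseWitness_solution) ∧ solution_alt (pvRaiseWitness_solution) = pvRaiseWitnessOut_solution)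

-- ===== LEMMAS AND PROOFS =====

lemma treeA_get (m : Nat) (n i : Int) (h1 : 1 ≤ i) (h2 : i ≤ (m : Int)) :
    ((PySem.List.pyRange 1 ((m : Int) + 1) 1).foldl
      (fun t j => if j * 2 > n then t.insert j (none, none)
                  else t.insert j (some (j * 2), some (j * 2 + 1)))
      PySem.Dict.empty).get? i
    = some (if i * 2 > n then (none, none) else (some (i * 2), some (i * 2 + 1))) := by
  induction m with
  | zero => omega
  | succ k ih =>
    have hr : PySem.List.pyRange 1 (((k : Int) + 1) + 1) 1
        = PySem.List.pyRange 1 ((k : Int) + 1) 1 ++ [(k : Int) + 1] := by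
      exact PySem.List.pyRange_one_succ_right (by omega)
    have hcast : ((Nat.succ k : Nat) : Int) + 1 = ((k : Int) + 1) + 1 := by push_cast; ring
    rw [hcast, hr, List.foldl_append]
    simp only [List.foldl]
    by_cases hik : i = (k : Int) + 1
    · subst hik
      split_ifs with hc
      · rw [PySem.Dict.get?_insert_self]
      · rw [PySem.Dict.get?_insert_self]
    · have hi2 : i ≤ (k : Int) := by omega
      have hfold := ih hi2
      split_ifs with hc hd hd <;>
        rw [PySem.Dict.get?_insert_of_ne _ _ (by omega), hfold] <;> simp_all

lemma treeA_get' (m : Nat) (i : Int) (h1 : 1 ≤ i) (h2 : i ≤ (m : Int)) :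
    (treeA (m : Int)).get? i
    = some (if i * 2 > (m : Int) then (none, none) else (some (i * 2), some (i * 2 + 1))) :=
  treeA_get m (m : Int) i h1 h2

lemma preA_none (t : PySem.Dict Int (Option Int × Option Int)) (fuel : Nat) (res : List Int) :
    preA t fuel none res = res := by cases fuel <;> simp [preA]

lemma inoA_none (t : PySem.Dict Int (Option Int × Option Int)) (fuel : Nat) (res : List Int) :
    inoA t fuel none res = res := by cases fuel <;> simp [inoA]

lemma postA_none (t : PySem.Dict Int (Option Int × Option Int)) (fuel : Nat) (res : List Int) :
    postA t fuel none res = res := by cases fuel <;> simp [postA]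

lemma preB_gt (n : Int) (fuel : Nat) (i : Int) (h : i > n) : preB n fuel i = [] := by
  cases fuel <;> simp [preB, h]

lemma inoB_gt (n : Int) (fuel : Nat) (i : Int) (h : i > n) : inoB n fuel i = [] := by
  cases fuel <;> simp [inoB, h]

lemma postB_gt (n : Int) (fuel : Nat) (i : Int) (h : i > n) : postB n fuel i = [] := by
  cases fuel <;> simp [postB, h]

lemma preA_eq (m : Nat) (hodd : m % 2 = 1) :
    ∀ (fuel : Nat) (i : Int) (res : List Int), 1 ≤ i → i ≤ (m : Int) →
      preA (treeA (m : Int)) fuel (some i) res = res ++ preB (m : Int) fuel i := by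
  intro fuel
  induction fuel with
  | zero => intro i res _ _; simp [preA, preB]
  | succ f ih =>
    intro i res h1 h2
    have hget := treeA_get' m i h1 h2
    by_cases hc : i * 2 > (m : Int)
    · simp only [preA, hget, if_pos hc]
      simp [preA_none, preB, not_lt.mpr h2,
        preB_gt (m : Int) f (2 * i) (by omega), preB_gt (m : Int) f (2 * i + 1) (by omega)]
    · have h2i : 2 * i ≤ (m : Int) := by omega
      have h2i1 : 2 * i + 1 ≤ (m : Int) := by
        have : (m : Int) % 2 = 1 := by omega
        omega
      simp only [preA, hget, if_neg hc]
      have e1 := ih (2 * i) (res ++ [i]) (by omega) h2i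
      have e2 := ih (2 * i + 1) ((res ++ [i]) ++ preB (m : Int) f (2 * i)) (by omega) h2i1
      have h2iw : i * 2 = 2 * i := by ring
      rw [h2iw, e1, e2]
      simp [preB, not_lt.mpr h2]

lemma inoA_eq (m : Nat) (hodd : m % 2 = 1) :
    ∀ (fuel : Nat) (i : Int) (res : List Int), 1 ≤ i → i ≤ (m : Int) →
      inoA (treeA (m : Int)) fuel (some i) res = res ++ inoB (m : Int) fuel i := by
  intro fuel
  induction fuel with
  | zero => intro i res _ _; simp [inoA, inoB]
  | succ f ih =>
    intro i res h1 h2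
    have hget := treeA_get' m i h1 h2
    by_cases hc : i * 2 > (m : Int)
    · simp only [inoA, hget, if_pos hc]
      simp [inoA_none, inoB, not_lt.mpr h2,
        inoB_gt (m : Int) f (2 * i) (by omega), inoB_gt (m : Int) f (2 * i + 1) (by omega)]
    · have h2i : 2 * i ≤ (m : Int) := by omega
      have h2i1 : 2 * i + 1 ≤ (m : Int) := by
        have : (m : Int) % 2 = 1 := by omega
        omega
      simp only [inoA, hget, if_neg hc]
      have e1 := ih (2 * i) res (by omega) h2i
      have e2 := ih (2 * i + 1) ((res ++ inoB (m : Int) f (2 * i)) ++ [i]) (by omega) h2i1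
      have h2iw : i * 2 = 2 * i := by ring
      rw [h2iw, e1, e2]
      simp [inoB, not_lt.mpr h2]

lemma postA_eq (m : Nat) (hodd : m % 2 = 1) :
    ∀ (fuel : Nat) (i : Int) (res : List Int), 1 ≤ i → i ≤ (m : Int) →
      postA (treeA (m : Int)) fuel (some i) res = res ++ postB (m : Int) fuel i := by
  intro fuel
  induction fuel with
  | zero => intro i res _ _; simp [postA, postB]
  | succ f ih =>
    intro i res h1 h2
    have hget := treeA_get' m i h1 h2
    by_cases hc : i * 2 > (m : Int)
    · simp only [postA, hget, if_pos hc]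
      simp [postA_none, postB, not_lt.mpr h2,
        postB_gt (m : Int) f (2 * i) (by omega), postB_gt (m : Int) f (2 * i + 1) (by omega)]
    · have h2i : 2 * i ≤ (m : Int) := by omega
      have h2i1 : 2 * i + 1 ≤ (m : Int) := by
        have : (m : Int) % 2 = 1 := by omega
        omega
      simp only [postA, hget, if_neg hc]
      have e1 := ih (2 * i) res (by omega) h2i
      have e2 := ih (2 * i + 1) (res ++ postB (m : Int) f (2 * i)) (by omega) h2i1
      have h2iw : i * 2 = 2 * i := by ring
      rw [h2iw, e1, e2]
      simp [postB, not_lt.mpr h2]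

-- ===== VERDICT (by name: the statement is the Claim_ definition above) =====
theorem solution_spec : Claim_equal_solution := by
  intro nodes _ hpre
  unfold Spec_solution solution solution_alt
  have hodd : nodes.length % 2 = 1 := hpre
  have hm : 1 ≤ (nodes.length : Int) := by omega
  simp only [PySem.List.len_eq]
  rw [preA_eq nodes.length hodd (nodes.length + 1) 1 [] le_rfl hm,
      inoA_eq nodes.length hodd (nodes.length + 1) 1 [] le_rfl hm,
      postA_eq nodes.length hodd (nodes.length + 1) 1 [] le_rfl hm]
  simp

@[simp] theorem solution_raises : Claim_raises_solution := by
  unfold Claim_raises_solution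
  constructor
  · intro nodes _ hr hp
    unfold Raises_solution at hr
    unfold Pre_solution at hp
    omega
  · refine ⟨by decide, by decide, by decide⟩
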